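-- pv_equiv track=rewrite | github.com/Max2772/Selected-Chapters-Of-Computer-Science-LB2-5 | LB3/task4.py | repeated_words
-- ===== SOURCE A (Python) =====
-- def repeated_words(words: list[str]) -> list[str]:
--     """
--     Return words that appear more than once in words, preserving first-seen
--     order and without duplicates in the result.
--
--     Args:
--         words (list[str]): list of lowercase words
--
--     Returns:
--         list[str]: words that occur at least twice
--     """
--     seen = {}
--     for w in words:
--         seen[w] = seen.get(w, 0) + 1
--     # Preserve order of first appearance
--     added = set()
--     result = []
--     for w in words:
--         if seen[w] > 1 and w not in added:
--             result.append(w)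
--             added.add(w)
--     return result
-- ===== SOURCE B (Python) =====
-- def repeated_words(words: list[str]) -> list[str]:
--     """Words appearing more than once, in first-seen order."""
--     seen = {}
--     for w in words:
--         seen[w] = seen.get(w, 0) + 1
--     # dicts preserve first-insertion order, so one pass over items suffices
--     return [w for w, c in seen.items() if c > 1]
-- ===== Notes on version B (the rewrite author's own statement) =====
-- stated objective: simpler
-- what changed: B drops A's second scan over the input list and its auxiliary dedup set, reading the result directly off the insertion-ordered count dict's items.
import Mathlib
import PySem

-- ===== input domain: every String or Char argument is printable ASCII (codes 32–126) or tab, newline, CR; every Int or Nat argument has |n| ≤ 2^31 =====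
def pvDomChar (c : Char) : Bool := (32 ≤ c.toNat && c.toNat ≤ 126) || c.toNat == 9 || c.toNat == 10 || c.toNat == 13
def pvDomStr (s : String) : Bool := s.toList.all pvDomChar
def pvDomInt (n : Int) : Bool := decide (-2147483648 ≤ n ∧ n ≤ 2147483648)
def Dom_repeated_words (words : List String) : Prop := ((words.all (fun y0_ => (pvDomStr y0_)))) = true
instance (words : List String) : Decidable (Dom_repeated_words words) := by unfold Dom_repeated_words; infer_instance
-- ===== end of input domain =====

-- B reads the result off the insertion-ordered count dict's items in one pass,
-- dropping A's second scan of the input list and its auxiliary dedup set (objective: simpler).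


-- ===== PORT A =====
-- 'seen[w]' in the second loop: the key is always present (inserted by the first loop), so getD 0 is exact there.
def repeated_words (words : List String) : List String :=
  let seen : PySem.Dict String Int :=
    words.foldl (fun d w => d.insert w (d.getD w 0 + 1)) PySem.Dict.empty
  (words.foldl
    (fun (st : PySem.Set String × List String) w =>
      if (decide (1 < seen.getD w 0) && !(PySem.Set.contains st.1 w)) = true then
        (PySem.Set.add st.1 w, st.2 ++ [w])
      else st)
    (PySem.Set.empty, [])).2

-- ===== PORT B =====
def repeated_words_alt (words : List String) : List String :=
  let seen : PySem.Dict String Int :=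
    words.foldl (fun d w => d.insert w (d.getD w 0 + 1)) PySem.Dict.empty
  ((seen.items.filter (fun p => decide (1 < p.2))).map (·.1))

-- ===== PRECONDITION & SPEC =====
def Spec_repeated_words (words : List String) (out : List String) : Prop := out = repeated_words_alt words
instance (words : List String) (out : List String) : Decidable (Spec_repeated_words words out) := by unfold Spec_repeated_words; infer_instance

-- ===== CLAIM (what is proved, stated in full; the proofs are below) =====
def Claim_equal_repeated_words : Prop := ∀ (words : List String), Dom_repeated_words words → Spec_repeated_words words (repeated_words words)

-- ===== LEMMAS AND PROOFS =====

-- PySem.Set.discard is definitionally a filter; in this form List.filter_filter applies.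
theorem pvDiscard_eq_filter (s : List String) (x : String) :
    PySem.Set.discard s x = s.filter (fun y => !(y == x)) := rfl

-- A's second loop with a dedup set produces the first-seen dedup of l, filtered by pred
-- (restricted to elements not already in the starting set s).
theorem pvLoopA_snd (pred : String → Bool) (l : List String) :
    ∀ (s : PySem.Set String) (r : List String),
      (l.foldl
        (fun (st : PySem.Set String × List String) w =>
          if (pred w && !(PySem.Set.contains st.1 w)) = true then
            (PySem.Set.add st.1 w, st.2 ++ [w])
          else st)
        (s, r)).2
      = r ++ (PySem.Set.ofList l).filter (fun w => pred w && !(PySem.Set.contains s w)) := by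
  induction l with
  | nil => intro s r; simp [PySem.Set.ofList_nil]
  | cons w t ih =>
      intro s r
      rw [PySem.Set.ofList_cons]
      by_cases hp : pred w = true
      · by_cases hm : w ∈ s
        · have hc : PySem.Set.contains s w = true := (PySem.Set.contains_iff s w).2 hm
          simp only [List.foldl_cons, hp, hc, Bool.not_true, Bool.and_false, Bool.false_eq_true,
            if_false]
          rw [ih s r]
          congr 1
          simp only [List.filter_cons, hp, hc, Bool.not_true, Bool.and_false, Bool.false_eq_true,
            if_false, pvDiscard_eq_filter, List.filter_filter]
          apply List.filter_congr
          intro x _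
          by_cases hx : x = w
          · subst hx; simp [hm]
          · simp [hx]
        · have hc : PySem.Set.contains s w = false := by
            by_contra h
            exact hm ((PySem.Set.contains_iff s w).1 (by simpa using h))
          have hca : ∀ x, PySem.Set.contains (PySem.Set.add s w) x = (PySem.Set.contains s x || x == w) := by
            intro x
            rw [Bool.eq_iff_iff]
            simp [PySem.Set.mem_add]
          simp only [List.foldl_cons, hp, hc, Bool.not_false, Bool.and_true, if_true]
          rw [ih (PySem.Set.add s w) (r ++ [w])]
          simp only [List.filter_cons, hp, hc, Bool.not_false, Bool.and_true, if_true,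
            List.append_assoc, List.singleton_append]
          congr 2
          simp only [pvDiscard_eq_filter, List.filter_filter, hca]
          apply List.filter_congr
          intro x _
          by_cases hx : x = w
          · subst hx; simp
          · simp [Bool.and_assoc]
      · have hp' : pred w = false := by simpa using hp
        simp only [List.foldl_cons, hp', Bool.false_and, Bool.false_eq_true, if_false]
        rw [ih s r]
        congr 1
        simp only [List.filter_cons, hp', Bool.false_and, Bool.false_eq_true, if_false,
          pvDiscard_eq_filter, List.filter_filter]
        apply List.filter_congr
        intro x _
        by_cases hx : x = w
        · subst hx; simp [hp']
        · simp [hx]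

-- ===== VERDICT (by name: the statement is the Claim_ definition above) =====
theorem repeated_words_spec : Claim_equal_repeated_words := by
  unfold Claim_equal_repeated_words Spec_repeated_words
  intro words _
  unfold repeated_words repeated_words_alt
  simp only [PySem.Dict.foldl_insert_getD_add_one_eq_counter]
  refine (pvLoopA_snd (fun w => decide (1 < (PySem.Dict.counter words).getD w 0)) words PySem.Set.empty []).trans ?_
  simp [PySem.Dict.items_counter, List.filter_map, PySem.Dict.getD_counter,
    Function.comp_def, PySem.Set.contains_eq_listContains]
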